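-- pv_equiv track=rewrite | github.com/amol-ship-it/agi-core | domains/arc/transformation_primitives.py | draw_line_between_objects
-- ===== SOURCE A (Python) =====
-- Grid = list[list[int]]
--
-- def draw_line_between_objects(grid: Grid) -> Grid:
--     """For each pair of same-color non-zero pixels on same row or column, fill the gap.
--
--     Fills the gap between same-color pixels on the same row or column with
--     that color.
--     """
--     if not grid or not grid[0]:
--         return grid
--     h, w = len(grid), len(grid[0])
--     result = [row[:] for row in grid]
--     # Horizontal: same row, same color
--     for r in range(h):
--         color_positions: dict[int, list[int]] = {}
--         for c in range(w):
--             if grid[r][c] != 0: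
--                 color_positions.setdefault(grid[r][c], []).append(c)
--         for color, positions in color_positions.items():
--             if len(positions) >= 2:
--                 lo, hi = min(positions), max(positions)
--                 for c in range(lo, hi + 1):
--                     result[r][c] = color
--     # Vertical: same column, same color
--     for c in range(w):
--         color_positions = {}
--         for r in range(h):
--             if grid[r][c] != 0:
--                 color_positions.setdefault(grid[r][c], []).append(r)
--         for color, positions in color_positions.items():
--             if len(positions) >= 2:
--                 lo, hi = min(positions), max(positions)
--                 for r in range(lo, hi + 1):
--                     result[r][c] = color
--     return result
-- ===== SOURCE B (Python) =====
-- def draw_line_between_objects(grid):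
--     """For each pair of same-color non-zero pixels on same row or column, fill the gap.
--
--     Functional formulation: one scan per line records each color's first/last
--     occurrence span; each output cell is then computed directly, taking the
--     latest-recorded color whose span properly covers it (column spans override
--     row spans), with no mutation of intermediate grids.
--     """
--     if not grid or not grid[0]:
--         return grid
--     h, w = len(grid), len(grid[0])
--
--     def spans(line):
--         d = {}
--         for i, v in enumerate(line):
--             if v != 0:
--                 d[v] = (d[v][0], i) if v in d else (i, i)
--         return d
--
--     def pick(d, i, default):
--         best = None
--         for v, (f, l) in d.items():
--             if f < l and f <= i <= l:
--                 best = v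
--         return default if best is None else best
--
--     row_spans = [spans(row) for row in grid]
--     col_spans = [spans([row[c] for row in grid]) for c in range(w)]
--     return [[pick(col_spans[c], r, pick(row_spans[r], c, grid[r][c]))
--              for c in range(w)]
--             for r in range(h)]
-- ===== Notes on version B (the rewrite author's own statement) =====
-- stated objective: alternative
-- what changed: Instead of mutating a copied grid with per-color min/max range fills (rows, then columns), B computes each output cell functionally: one scan per line records each color's first/last occurrence span, and each cell takes the latest-recorded color whose span properly covers it (column spans overriding row spans), with no mutation; …
-- outside the precondition, e.g. on draw_line_between_objects([[1, 2], [3, 4, 5]]): A returns [[1, 2], [3, 4, 5]], B returns [[1, 2], [3, 4]]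
import Mathlib
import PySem

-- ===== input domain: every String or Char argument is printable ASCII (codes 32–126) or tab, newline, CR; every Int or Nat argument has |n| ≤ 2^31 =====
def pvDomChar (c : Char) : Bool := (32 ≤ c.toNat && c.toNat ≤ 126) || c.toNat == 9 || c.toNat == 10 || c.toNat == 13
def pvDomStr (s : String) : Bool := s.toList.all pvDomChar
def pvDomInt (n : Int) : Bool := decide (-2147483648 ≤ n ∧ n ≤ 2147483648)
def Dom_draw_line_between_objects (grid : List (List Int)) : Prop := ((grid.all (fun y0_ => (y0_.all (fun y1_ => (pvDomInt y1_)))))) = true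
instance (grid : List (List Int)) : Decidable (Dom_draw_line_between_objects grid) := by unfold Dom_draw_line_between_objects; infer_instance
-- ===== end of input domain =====

-- B computes each output cell functionally from per-line first/last-occurrence spans instead of
-- mutating a copied grid with per-color min/max range fills (alternative decomposition, no speed claim).
-- Equivalence is about the RETURN value (A mutates only its own copy, so no visible side effects).

-- ===== PORT A =====
-- grid[r][c] for in-range non-negative indices (exact there; all reads of A are in range under Pre_)
def pvCell (g : List (List Int)) (r c : Int) : Int :=
  PySem.List.pyGetD (PySem.List.pyGetD g r []) c 0

-- result[r][c] = v for in-range indices (exact there; all writes of A are in range under Pre_)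
def pvSet2 (g : List (List Int)) (r c : Nat) (v : Int) : List (List Int) :=
  g.set r ((g.getD r []).set c v)

-- the dict-building scan: color_positions with setdefault(color, []).append(i)  =  modify color [] (· ++ [i])
def pvPosDictIdx (read : Int → Int) (n : Int) : PySem.Dict Int (List Int) :=
  (PySem.List.pyRange 0 n).foldl (fun d i =>
    if read i ≠ 0 then d.modify (read i) [] (· ++ [i]) else d) PySem.Dict.empty

-- the horizontal fill loop over color_positions.items() for a fixed row rN
-- (min/max of a list Python knows is nonempty since len ≥ 2; the .getD 0 is unreachable)
def pvFillRow (rN : Nat) (items : List (Int × List Int)) (res : List (List Int)) : List (List Int) :=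
  items.foldl (fun res p =>
    if 2 ≤ p.2.length then
      let lo := (PySem.List.min? p.2 (fun x => x)).getD 0
      let hi := (PySem.List.max? p.2 (fun x => x)).getD 0
      (PySem.List.pyRange lo (hi + 1)).foldl (fun res c => pvSet2 res rN c.toNat p.1) res
    else res) res

-- the vertical fill loop over color_positions.items() for a fixed column cN
def pvFillCol (cN : Nat) (items : List (Int × List Int)) (res : List (List Int)) : List (List Int) :=
  items.foldl (fun res p =>
    if 2 ≤ p.2.length then
      let lo := (PySem.List.min? p.2 (fun x => x)).getD 0
      let hi := (PySem.List.max? p.2 (fun x => x)).getD 0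
      (PySem.List.pyRange lo (hi + 1)).foldl (fun res r => pvSet2 res r.toNat cN p.1) res
    else res) res

def draw_line_between_objects (grid : List (List Int)) : List (List Int) :=
  if grid = [] ∨ grid.headD [] = [] then grid
  else
    let h : Int := grid.length
    let w : Int := (grid.headD []).length
    -- result = [row[:] for row in grid]; Horizontal: same row, same color
    let result :=
      (PySem.List.pyRange 0 h).foldl (fun res r =>
        pvFillRow r.toNat (pvPosDictIdx (fun c => pvCell grid r c) w).items res) grid
    -- Vertical: same column, same color
    (PySem.List.pyRange 0 w).foldl (fun res c =>
      pvFillCol c.toNat (pvPosDictIdx (fun r => pvCell grid r c) h).items res) result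

-- ===== PORT B =====
-- spans(line): color -> (first index, last index) of its occurrences
def pvSpans (line : List Int) : PySem.Dict Int (Int × Int) :=
  (PySem.List.enumerate line).foldl (fun d p =>
    if p.2 ≠ 0 then
      d.insert p.2 (if d.contains p.2 then ((d.getD p.2 (0, 0)).1, p.1) else (p.1, p.1))
    else d) PySem.Dict.empty

-- pick(d, i, default): latest-recorded color whose span properly covers i, else default
def pvPick (d : PySem.Dict Int (Int × Int)) (i dflt : Int) : Int :=
  (d.items.foldl (fun best q =>
      if q.2.1 < q.2.2 ∧ q.2.1 ≤ i ∧ i ≤ q.2.2 then some q.1 else best)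
    (none : Option Int)).getD dflt

def draw_line_between_objects_alt (grid : List (List Int)) : List (List Int) :=
  if grid = [] ∨ grid.headD [] = [] then grid
  else
    let h : Int := grid.length
    let w : Int := (grid.headD []).length
    let rowSpans := grid.map (fun row => pvSpans row)
    let colSpans := (PySem.List.pyRange 0 w).map (fun c =>
      pvSpans (grid.map (fun row => PySem.List.pyGetD row c 0)))
    (PySem.List.pyRange 0 h).map (fun r =>
      (PySem.List.pyRange 0 w).map (fun c =>
        pvPick (PySem.List.pyGetD colSpans c PySem.Dict.empty) r
          (pvPick (PySem.List.pyGetD rowSpans r PySem.Dict.empty) c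
            (PySem.List.pyGetD (PySem.List.pyGetD grid r []) c 0))))

-- ===== PRECONDITION & SPEC =====
-- Pre_ restricts to rectangular grids (or a grid whose first row is empty, returned unchanged),
-- the natural domain of the Grid type: A raises IndexError when some row is shorter than the
-- first, and on ragged grids with longer rows A's leaving the cells beyond the first row's
-- width untouched is an accident of reading only grid[0]'s width (B returns a rectangular grid).
def Pre_draw_line_between_objects (grid : List (List Int)) : Prop :=
  grid.headD [] = [] ∨ ∀ row ∈ grid, row.length = (grid.headD []).length
instance (grid : List (List Int)) : Decidable (Pre_draw_line_between_objects grid) := by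
  unfold Pre_draw_line_between_objects; infer_instance

def pvWitness_draw_line_between_objects : List (List Int) := [[1, 0, 1], [0, 2, 0], [0, 2, 0]]

def Spec_draw_line_between_objects (grid : List (List Int)) (out : List (List Int)) : Prop :=
  out = draw_line_between_objects_alt grid
instance (grid : List (List Int)) (out : List (List Int)) :
    Decidable (Spec_draw_line_between_objects grid out) := by
  unfold Spec_draw_line_between_objects; infer_instance

-- ===== CLAIM (what is proved, stated in full; the proofs are below) =====
def Claim_equal_draw_line_between_objects : Prop :=
  ∀ (grid : List (List Int)), Dom_draw_line_between_objects grid →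
    Pre_draw_line_between_objects grid →
    Spec_draw_line_between_objects grid (draw_line_between_objects grid)

-- ===== LEMMAS AND PROOFS =====

-- cell access by Nat indices
def gN (g : List (List Int)) (r c : Nat) : Int := (g.getD r []).getD c 0

-- the scan list of an indexed line: (color, index) for the nonzero entries, in scan order
def pvPlIdx (read : Int → Int) (nN : Nat) : List (Int × Int) :=
  ((PySem.List.pyRange 0 (nN : Int)).map (fun i => (read i, i))).filter (fun p => p.1 != 0)

-- the occurrence indices of color v
def pvOcc (read : Int → Int) (nN : Nat) (v : Int) : List Int :=
  ((pvPlIdx read nN).filter (fun p => p.1 == v)).map (fun p => p.2)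

-- the distinct colors in first-occurrence order
def pvKeys (read : Int → Int) (nN : Nat) : List Int :=
  PySem.Set.ofList ((pvPlIdx read nN).map (fun p => p.1))

-- "color v's span properly covers index i"
def pvCovB (read : Int → Int) (nN : Nat) (v i : Int) : Bool :=
  match pvOcc read nN v with
  | [] => false
  | x :: t => decide (x < t.getLastD x ∧ x ≤ i ∧ i ≤ t.getLastD x)

-- the color that ends up at index i of a line: latest key (in first-occurrence order) covering i
def pvWin (read : Int → Int) (nN : Nat) (i : Int) : Option Int :=
  (pvKeys read nN).foldl (fun best v => if pvCovB read nN v i then some v else best) none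

-- cell value after the horizontal pass / after both passes
def pvHVal (grid : List (List Int)) (wN : Nat) (r c : Nat) : Int :=
  (pvWin (fun j => pvCell grid (r : Int) j) wN (c : Int)).getD (gN grid r c)

def pvFVal (grid : List (List Int)) (hN wN : Nat) (r c : Nat) : Int :=
  if c < wN then
    (pvWin (fun j => pvCell grid j (c : Int)) hN (r : Int)).getD (pvHVal grid wN r c)
  else pvHVal grid wN r c

-- getD after set
theorem pvGetD_set {α : Type} (l : List α) (i j : Nat) (x d : α) :
    (l.set i x).getD j d = if j = i ∧ i < l.length then x else l.getD j d := by
  by_cases hi : i < l.length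
  · by_cases hj : j = i
    · subst hj
      rw [List.getD_eq_getElem?_getD, List.getElem?_set_self (by simpa using hi)]
      simp [hi]
    · rw [List.getD_eq_getElem?_getD, List.getElem?_set_ne (by omega), ← List.getD_eq_getElem?_getD]
      simp [hj]
  · rw [List.set_eq_of_length_le (by omega)]
    simp [hi]

-- ---- shape preservation ----
def pvShapeEq (g g' : List (List Int)) : Prop :=
  g.length = g'.length ∧ ∀ r, (g.getD r []).length = (g'.getD r []).length

theorem pvShapeEq_refl (g : List (List Int)) : pvShapeEq g g := ⟨rfl, fun _ => rfl⟩

theorem pvShapeEq_trans {g1 g2 g3 : List (List Int)} :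
    pvShapeEq g1 g2 → pvShapeEq g2 g3 → pvShapeEq g1 g3 :=
  fun h1 h2 => ⟨h1.1.trans h2.1, fun r => (h1.2 r).trans (h2.2 r)⟩

theorem pvShapeEq_set2 (g : List (List Int)) (r c : Nat) (v : Int) :
    pvShapeEq (pvSet2 g r c v) g := by
  unfold pvSet2
  refine ⟨by simp, fun r' => ?_⟩
  rw [pvGetD_set]
  split_ifs with h
  · rw [h.1]; simp
  · rfl

theorem pvShapeEq_foldl {α : Type} (L : List α) (f : List (List Int) → α → List (List Int))
    (hf : ∀ g a, pvShapeEq (f g a) g) (g : List (List Int)) :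
    pvShapeEq (L.foldl f g) g := by
  induction L generalizing g with
  | nil => exact pvShapeEq_refl g
  | cons a L ih => exact pvShapeEq_trans (ih (f g a)) (hf g a)

-- ---- pointwise effect of writes ----
theorem gN_set2 (g : List (List Int)) (rN cN : Nat) (v : Int) (r' c' : Nat) :
    gN (pvSet2 g rN cN v) r' c' =
      if r' = rN ∧ c' = cN ∧ rN < g.length ∧ cN < (g.getD rN []).length then v
      else gN g r' c' := by
  unfold gN pvSet2
  rw [pvGetD_set]
  split_ifs with h1 h2 h2
  · rw [pvGetD_set]
    split_ifs with h3
    · rfl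
    · exact absurd ⟨h2.2.1, h2.2.2.2⟩ h3
  · rw [pvGetD_set]
    split_ifs with h3
    · exact absurd ⟨h1.1, h3.1, h1.2, h3.2⟩ h2
    · rw [h1.1]
  · exact (h1 ⟨h2.1, h2.2.2.1⟩).elim
  · rfl

-- constant-color fill along a row, over an arbitrary list of in-range indices
theorem gN_fill_row (L : List Int) (rN : Nat) (v : Int) (g : List (List Int))
    (hB : ∀ x ∈ L, 0 ≤ x ∧ rN < g.length ∧ x.toNat < (g.getD rN []).length) (r' c' : Nat) :
    gN (L.foldl (fun res c => pvSet2 res rN c.toNat v) g) r' c' =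
      if r' = rN ∧ (c' : Int) ∈ L then v else gN g r' c' := by
  induction L generalizing g with
  | nil => simp
  | cons x L ih =>
    simp only [List.foldl_cons]
    have hx := hB x (by simp)
    have hsh := pvShapeEq_set2 g rN x.toNat v
    rw [ih (pvSet2 g rN x.toNat v) (fun y hy => by
      have := hB y (List.mem_cons_of_mem _ hy)
      exact ⟨this.1, by rw [hsh.1]; exact this.2.1, by rw [hsh.2 rN]; exact this.2.2⟩)]
    rw [gN_set2]
    have hx0 := hx.1
    by_cases h1 : r' = rN
    · subst h1
      by_cases h2 : (c' : Int) ∈ L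
      · rw [if_pos ⟨rfl, h2⟩, if_pos ⟨rfl, List.mem_cons_of_mem _ h2⟩]
      · rw [if_neg (fun hh => h2 hh.2)]
        by_cases h3 : (c' : Int) = x
        · have hcx : c' = x.toNat := by omega
          rw [if_pos ⟨rfl, hcx, hx.2.1, hx.2.2⟩,
            if_pos ⟨rfl, List.mem_cons.mpr (Or.inl h3)⟩]
        · have hcx : ¬ (r' = r' ∧ c' = x.toNat ∧ r' < g.length ∧ x.toNat < (g.getD r' []).length) := by
            rintro ⟨-, hc, -, -⟩
            exact h3 (by omega)
          rw [if_neg hcx, if_neg (by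
            rintro ⟨-, hm⟩
            rcases List.mem_cons.mp hm with h | h
            · exact h3 h
            · exact h2 h)]
    · rw [if_neg (fun hh => h1 hh.1), if_neg (fun hh => h1 hh.1), if_neg (fun hh => h1 hh.1)]

-- constant-color fill along a column
theorem gN_fill_col (L : List Int) (cN : Nat) (v : Int) (g : List (List Int))
    (hB : ∀ x ∈ L, 0 ≤ x ∧ x.toNat < g.length ∧ cN < (g.getD x.toNat []).length) (r' c' : Nat) :
    gN (L.foldl (fun res r => pvSet2 res r.toNat cN v) g) r' c' =
      if c' = cN ∧ (r' : Int) ∈ L then v else gN g r' c' := by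
  induction L generalizing g with
  | nil => simp
  | cons x L ih =>
    simp only [List.foldl_cons]
    have hx := hB x (by simp)
    have hsh := pvShapeEq_set2 g x.toNat cN v
    rw [ih (pvSet2 g x.toNat cN v) (fun y hy => by
      have := hB y (List.mem_cons_of_mem _ hy)
      exact ⟨this.1, by rw [hsh.1]; exact this.2.1, by rw [hsh.2 y.toNat]; exact this.2.2⟩)]
    rw [gN_set2]
    have hx0 := hx.1
    by_cases h1 : c' = cN
    · subst h1
      by_cases h2 : (r' : Int) ∈ L
      · rw [if_pos ⟨rfl, h2⟩, if_pos ⟨rfl, List.mem_cons_of_mem _ h2⟩]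
      · rw [if_neg (fun hh => h2 hh.2)]
        by_cases h3 : (r' : Int) = x
        · have hrx : r' = x.toNat := by omega
          rw [if_pos ⟨hrx, rfl, hx.2.1, hx.2.2⟩,
            if_pos ⟨rfl, List.mem_cons.mpr (Or.inl h3)⟩]
        · have hrx : ¬ (r' = x.toNat ∧ c' = c' ∧ x.toNat < g.length ∧ c' < (g.getD x.toNat []).length) := by
            rintro ⟨hc, -, -, -⟩
            exact h3 (by omega)
          rw [if_neg hrx, if_neg (by
            rintro ⟨-, hm⟩
            rcases List.mem_cons.mp hm with h | h
            · exact h3 h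
            · exact h2 h)]
    · rw [if_neg (fun hh => h1 hh.1), if_neg (fun hh => h1 hh.2.1), if_neg (fun hh => h1 hh.1)]

-- a keep-or-override fold restarted from `none`
theorem pvFoldl_or {β : Type} (cond : β → Bool) (val : β → Int) (l : List β) (b : Option Int) :
    l.foldl (fun best q => if cond q then some (val q) else best) b =
      (l.foldl (fun best q => if cond q then some (val q) else best) none).or b := by
  induction l generalizing b with
  | nil => simp
  | cons q l ih =>
    simp only [List.foldl_cons]
    rw [ih (if cond q then some (val q) else b), ih (if cond q then some (val q) else none)]
    by_cases h : cond q
    · simp [h]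
    · simp [h]

-- ---- facts about the scan list ----
theorem pvPl_mem (read : Int → Int) (nN : Nat) :
    ∀ p ∈ pvPlIdx read nN, p.1 = read p.2 ∧ 0 ≤ p.2 ∧ p.2 < (nN : Int) ∧ p.1 ≠ 0 := by
  intro p hp
  unfold pvPlIdx at hp
  have hp1 := List.of_mem_filter hp
  have hp2 := List.mem_of_mem_filter hp
  rw [List.mem_map] at hp2
  obtain ⟨i, hi, rfl⟩ := hp2
  rw [PySem.List.mem_pyRange_one] at hi
  refine ⟨rfl, hi.1, hi.2, by simpa using hp1⟩

theorem pvPl_pairwise (read : Int → Int) (nN : Nat) :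
    (pvPlIdx read nN).Pairwise (fun p q => p.2 < q.2) := by
  unfold pvPlIdx
  apply List.Pairwise.filter
  rw [List.pairwise_map, PySem.List.pyRange_zero_natCast, List.pairwise_map]
  exact List.Pairwise.imp (by intro a b h; simpa using h) List.pairwise_lt_range

theorem pvOcc_mem (read : Int → Int) (nN : Nat) (v : Int) :
    ∀ x ∈ pvOcc read nN v, 0 ≤ x ∧ x < (nN : Nat) ∧ read x = v := by
  intro x hx
  unfold pvOcc at hx
  rw [List.mem_map] at hx
  obtain ⟨p, hp, rfl⟩ := hx
  have h1 := List.of_mem_filter hp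
  have h2 := pvPl_mem read nN p (List.mem_of_mem_filter hp)
  have : p.1 = v := by simpa using h1
  exact ⟨h2.2.1, h2.2.2.1, by rw [← h2.1, this]⟩

theorem pvOcc_pairwise (read : Int → Int) (nN : Nat) (v : Int) :
    (pvOcc read nN v).Pairwise (· < ·) := by
  unfold pvOcc
  rw [List.pairwise_map]
  exact List.Pairwise.filter _ (pvPl_pairwise read nN)

theorem pvKeys_occ_ne (read : Int → Int) (nN : Nat) (v : Int) (h : v ∈ pvKeys read nN) :
    pvOcc read nN v ≠ [] := by
  unfold pvKeys at h
  rw [PySem.Set.mem_ofList, List.mem_map] at h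
  obtain ⟨p, hp, rfl⟩ := h
  unfold pvOcc
  simp only [ne_eq, List.map_eq_nil_iff, List.filter_eq_nil_iff, not_forall]
  exact ⟨p, hp, by simp⟩

-- ---- min/max of a strictly sorted nonempty list ----
theorem pvGe_head (x : Int) (t : List Int) (h : (x :: t).Pairwise (· < ·)) :
    ∀ y ∈ x :: t, x ≤ y := by
  intro y hy
  rcases List.mem_cons.mp hy with rfl | h1
  · omega
  · have := (List.pairwise_cons.mp h).1 y h1
    omega

theorem pvLe_getLastD (x : Int) (t : List Int) (h : (x :: t).Pairwise (· < ·)) :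
    ∀ y ∈ x :: t, y ≤ t.getLastD x := by
  induction t generalizing x with
  | nil =>
    intro y hy
    simp only [List.mem_singleton] at hy
    simp [hy]
  | cons z t ih =>
    intro y hy
    rw [List.getLastD_cons]
    have h' : (z :: t).Pairwise (· < ·) := h.sublist (List.sublist_cons_self _ _)
    rcases List.mem_cons.mp hy with rfl | h1
    · have hz : y < z := (List.pairwise_cons.mp h).1 z (by simp)
      have := ih z h' z (List.mem_cons_self ..)
      omega
    · exact ih z h' y h1

theorem pvMin_sorted (x : Int) (t : List Int) (h : (x :: t).Pairwise (· < ·)) :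
    PySem.List.min? (x :: t) (fun y => y) = some x := by
  rcases hm : PySem.List.min? (x :: t) (fun y => y) with _ | m
  · exact absurd ((PySem.List.min?_eq_none_iff _ _).mp hm) (by simp)
  · have hmem := PySem.List.min?_mem hm
    have hmin := PySem.List.min?_isMin hm x (List.mem_cons_self ..)
    have hge := pvGe_head x t h m hmem
    simp only [Option.some.injEq]
    omega

theorem pvMax_sorted (x : Int) (t : List Int) (h : (x :: t).Pairwise (· < ·)) :
    PySem.List.max? (x :: t) (fun y => y) = some (t.getLastD x) := by
  rcases hm : PySem.List.max? (x :: t) (fun y => y) with _ | m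
  · exact absurd ((PySem.List.max?_eq_none_iff _ _).mp hm) (by simp)
  · have hmem := PySem.List.max?_mem hm
    have hmax := PySem.List.max?_isMax hm (t.getLastD x) List.getLastD_mem_cons
    have hle := pvLe_getLastD x t h m hmem
    simp only [Option.some.injEq]
    omega

theorem pvLt_getLastD_iff (x : Int) (t : List Int) (h : (x :: t).Pairwise (· < ·)) :
    x < t.getLastD x ↔ t ≠ [] := by
  constructor
  · intro hx ht
    subst ht
    simp at hx
  · intro ht
    rcases t with _ | ⟨z, t⟩
    · exact absurd rfl ht
    · rw [List.getLastD_cons]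
      have hz : x < z := (List.pairwise_cons.mp h).1 z (by simp)
      have := pvLe_getLastD z t (h.sublist (List.sublist_cons_self _ _)) z (List.mem_cons_self ..)
      omega

-- ---- characterization of A's color_positions dict ----
theorem pvPosDict_eq_fold (read : Int → Int) (nN : Nat) :
    pvPosDictIdx read (nN : Int) =
      (pvPlIdx read nN).foldl (fun d p => d.modify p.1 [] (· ++ [p.2])) PySem.Dict.empty := by
  unfold pvPosDictIdx pvPlIdx
  rw [List.foldl_filter, List.foldl_map]
  simp only [bne_iff_ne, ne_eq]

theorem pvPosDict_getD (read : Int → Int) (nN : Nat) (v : Int) :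
    (pvPosDictIdx read (nN : Int)).getD v [] = pvOcc read nN v := by
  rw [pvPosDict_eq_fold, PySem.Dict.getD_foldl_modify_append, PySem.Dict.getD_empty]
  rfl

theorem pvPosDict_keys (read : Int → Int) (nN : Nat) :
    (pvPosDictIdx read (nN : Int)).keys = pvKeys read nN := by
  rw [pvPosDict_eq_fold]
  rw [PySem.Dict.keys_foldl_modify_key (pvPlIdx read nN) (fun p => p.1) []
    (fun d p => (· ++ [p.2])) PySem.Dict.empty]
  rw [PySem.Dict.keys_empty]
  rfl

theorem pvPosDict_nodup (read : Int → Int) (nN : Nat) :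
    (pvPosDictIdx read (nN : Int)).keys.Nodup := by
  rw [pvPosDict_eq_fold]
  exact PySem.Dict.nodup_keys_foldl_modify_key (pvPlIdx read nN) (fun p => p.1) []
    (fun d p => (· ++ [p.2])) PySem.Dict.empty (by rw [PySem.Dict.keys_empty]; exact List.nodup_nil)

theorem pvPosDict_items (read : Int → Int) (nN : Nat) :
    (pvPosDictIdx read (nN : Int)).items =
      (pvKeys read nN).map (fun k => (k, pvOcc read nN k)) := by
  rw [PySem.Dict.items_eq_map_keys _ (pvPosDict_nodup read nN) [], pvPosDict_keys]
  exact List.map_congr_left (fun k _ => by rw [pvPosDict_getD])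

-- ---- A's fill loops, pointwise ----
-- effect of one item's fill on a row
theorem pvStepRow_gN (rN : Nat) (read : Int → Int) (nN : Nat) (k : Int) (g : List (List Int))
    (hr : rN < g.length) (hw : nN ≤ (g.getD rN []).length) (r' c' : Nat) :
    gN (if 2 ≤ (pvOcc read nN k).length then
        (PySem.List.pyRange ((PySem.List.min? (pvOcc read nN k) (fun x => x)).getD 0)
          ((PySem.List.max? (pvOcc read nN k) (fun x => x)).getD 0 + 1)).foldl
          (fun res c => pvSet2 res rN c.toNat k) g
      else g) r' c' =
      if r' = rN ∧ pvCovB read nN k (c' : Int) then k else gN g r' c' := by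
  have hpw := pvOcc_pairwise read nN k
  have hmem := pvOcc_mem read nN k
  rcases hocc : pvOcc read nN k with _ | ⟨x, t⟩
  · simp [pvCovB, hocc]
  · rw [hocc] at hpw hmem
    rcases t with _ | ⟨z, t'⟩
    · have h2 : ¬ (2 ≤ ([x] : List Int).length) := by simp
      rw [if_neg h2]
      have : pvCovB read nN k (c' : Int) = false := by
        unfold pvCovB
        rw [hocc]
        simp
      rw [this]
      simp
    · rw [if_pos (by simp : 2 ≤ (x :: z :: t').length)]
      rw [pvMin_sorted x (z :: t') hpw, pvMax_sorted x (z :: t') hpw]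
      simp only [Option.getD_some]
      have hlast : (z :: t').getLastD x ∈ x :: z :: t' := List.getLastD_mem_cons
      have hlastlt := (hmem _ hlast).2.1
      have hxlt : x < (z :: t').getLastD x := (pvLt_getLastD_iff x (z :: t') hpw).mpr (by simp)
      rw [gN_fill_row _ _ _ _ (fun y hy => by
        rw [PySem.List.mem_pyRange_one] at hy
        have hx0 := (hmem x (by simp)).1
        refine ⟨by omega, hr, by omega⟩)]
      have hcov : ((c' : Int) ∈ PySem.List.pyRange x ((z :: t').getLastD x + 1)) =
          (pvCovB read nN k (c' : Int) = true) := by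
        unfold pvCovB
        rw [hocc, PySem.List.mem_pyRange_one]
        simp only [decide_eq_true_eq, eq_iff_iff]
        constructor
        · intro hh
          exact ⟨hxlt, by omega⟩
        · intro hh
          omega
      simp only [hcov]

-- the item loop over an arbitrary key list, row version
theorem pvFillRowK (rN : Nat) (read : Int → Int) (nN : Nat) (K : List Int) :
    ∀ (g : List (List Int)), rN < g.length → nN ≤ (g.getD rN []).length → ∀ (r' c' : Nat),
    gN (K.foldl (fun res k =>
        if 2 ≤ (pvOcc read nN k).length then
          (PySem.List.pyRange ((PySem.List.min? (pvOcc read nN k) (fun x => x)).getD 0)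
            ((PySem.List.max? (pvOcc read nN k) (fun x => x)).getD 0 + 1)).foldl
            (fun res c => pvSet2 res rN c.toNat k) res
        else res) g) r' c' =
      if r' = rN then
        (K.foldl (fun best v => if pvCovB read nN v (c' : Int) then some v else best) none).getD
          (gN g rN c')
      else gN g r' c' := by
  induction K with
  | nil =>
    intro g hr hw r' c'
    by_cases h : r' = rN
    · subst h; simp
    · simp [h]
  | cons k K ih =>
    intro g hr hw r' c'
    simp only [List.foldl_cons]
    have hshape : pvShapeEq (if 2 ≤ (pvOcc read nN k).length then
        (PySem.List.pyRange ((PySem.List.min? (pvOcc read nN k) (fun x => x)).getD 0)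
          ((PySem.List.max? (pvOcc read nN k) (fun x => x)).getD 0 + 1)).foldl
          (fun res c => pvSet2 res rN c.toNat k) g
      else g) g := by
      split_ifs
      · exact pvShapeEq_foldl _ _ (fun g (a : Int) => pvShapeEq_set2 g rN a.toNat k) g
      · exact pvShapeEq_refl g
    rw [ih _ (by rw [hshape.1]; exact hr) (by rw [hshape.2 rN]; exact hw)]
    rw [pvFoldl_or (fun v => pvCovB read nN v (c' : Int)) (fun v => v) K
      (if pvCovB read nN k (c' : Int) then some k else none)]
    by_cases h1 : r' = rN
    · subst h1
      rw [if_pos rfl, if_pos rfl]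
      rcases hK : K.foldl (fun best v => if pvCovB read nN v (c' : Int) then some v else best) none with _ | xx
      · simp only [Option.none_or]
        rw [pvStepRow_gN r' read nN k g hr hw r' c']
        by_cases hc : pvCovB read nN k (c' : Int)
        · rw [if_pos ⟨rfl, hc⟩, if_pos hc]
          rfl
        · rw [if_neg (fun hh => hc hh.2), if_neg hc]
      · simp
    · rw [if_neg h1, if_neg h1]
      rw [pvStepRow_gN rN read nN k g hr hw r' c']
      rw [if_neg (fun hh => h1 hh.1)]

theorem pvFillRow_gN (rN : Nat) (read : Int → Int) (nN : Nat) (g : List (List Int))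
    (hr : rN < g.length) (hw : nN ≤ (g.getD rN []).length) (r' c' : Nat) :
    gN (pvFillRow rN (pvPosDictIdx read (nN : Int)).items g) r' c' =
      if r' = rN then (pvWin read nN (c' : Int)).getD (gN g rN c') else gN g r' c' := by
  unfold pvFillRow pvWin
  rw [pvPosDict_items, List.foldl_map]
  exact pvFillRowK rN read nN (pvKeys read nN) g hr hw r' c'

theorem pvFillRow_shape (rN : Nat) (items : List (Int × List Int)) (g : List (List Int)) :
    pvShapeEq (pvFillRow rN items g) g := by
  unfold pvFillRow
  apply pvShapeEq_foldl
  intro g p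
  split_ifs
  · exact pvShapeEq_foldl _ _ (fun g (a : Int) => pvShapeEq_set2 g rN a.toNat p.1) g
  · exact pvShapeEq_refl g

theorem pvStepCol_gN (cN : Nat) (read : Int → Int) (nN : Nat) (k : Int) (g : List (List Int))
    (hh : nN ≤ g.length) (hc : ∀ rr, rr < nN → cN < (g.getD rr []).length) (r' c' : Nat) :
    gN (if 2 ≤ (pvOcc read nN k).length then
        (PySem.List.pyRange ((PySem.List.min? (pvOcc read nN k) (fun x => x)).getD 0)
          ((PySem.List.max? (pvOcc read nN k) (fun x => x)).getD 0 + 1)).foldl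
          (fun res r => pvSet2 res r.toNat cN k) g
      else g) r' c' =
      if c' = cN ∧ pvCovB read nN k (r' : Int) then k else gN g r' c' := by
  have hpw := pvOcc_pairwise read nN k
  have hmem := pvOcc_mem read nN k
  rcases hocc : pvOcc read nN k with _ | ⟨x, t⟩
  · simp [pvCovB, hocc]
  · rw [hocc] at hpw hmem
    rcases t with _ | ⟨z, t'⟩
    · have h2 : ¬ (2 ≤ ([x] : List Int).length) := by simp
      rw [if_neg h2]
      have : pvCovB read nN k (r' : Int) = false := by
        unfold pvCovB
        rw [hocc]
        simp
      rw [this]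
      simp
    · rw [if_pos (by simp : 2 ≤ (x :: z :: t').length)]
      rw [pvMin_sorted x (z :: t') hpw, pvMax_sorted x (z :: t') hpw]
      simp only [Option.getD_some]
      have hlast : (z :: t').getLastD x ∈ x :: z :: t' := List.getLastD_mem_cons
      have hlastlt := (hmem _ hlast).2.1
      have hxlt : x < (z :: t').getLastD x := (pvLt_getLastD_iff x (z :: t') hpw).mpr (by simp)
      rw [gN_fill_col _ _ _ _ (fun y hy => by
        rw [PySem.List.mem_pyRange_one] at hy
        have hx0 := (hmem x (by simp)).1
        refine ⟨by omega, by omega, hc y.toNat (by omega)⟩)]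
      have hcov : ((r' : Int) ∈ PySem.List.pyRange x ((z :: t').getLastD x + 1)) =
          (pvCovB read nN k (r' : Int) = true) := by
        unfold pvCovB
        rw [hocc, PySem.List.mem_pyRange_one]
        simp only [decide_eq_true_eq, eq_iff_iff]
        constructor
        · intro hhh
          exact ⟨hxlt, by omega⟩
        · intro hhh
          omega
      simp only [hcov]

theorem pvFillColK (cN : Nat) (read : Int → Int) (nN : Nat) (K : List Int) :
    ∀ (g : List (List Int)), nN ≤ g.length →
      (∀ rr, rr < nN → cN < (g.getD rr []).length) → ∀ (r' c' : Nat),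
    gN (K.foldl (fun res k =>
        if 2 ≤ (pvOcc read nN k).length then
          (PySem.List.pyRange ((PySem.List.min? (pvOcc read nN k) (fun x => x)).getD 0)
            ((PySem.List.max? (pvOcc read nN k) (fun x => x)).getD 0 + 1)).foldl
            (fun res r => pvSet2 res r.toNat cN k) res
        else res) g) r' c' =
      if c' = cN then
        (K.foldl (fun best v => if pvCovB read nN v (r' : Int) then some v else best) none).getD
          (gN g r' cN)
      else gN g r' c' := by
  induction K with
  | nil =>
    intro g hh hc r' c'
    by_cases h : c' = cN
    · subst h; simp
    · simp [h]
  | cons k K ih =>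
    intro g hh hc r' c'
    simp only [List.foldl_cons]
    have hshape : pvShapeEq (if 2 ≤ (pvOcc read nN k).length then
        (PySem.List.pyRange ((PySem.List.min? (pvOcc read nN k) (fun x => x)).getD 0)
          ((PySem.List.max? (pvOcc read nN k) (fun x => x)).getD 0 + 1)).foldl
          (fun res r => pvSet2 res r.toNat cN k) g
      else g) g := by
      split_ifs
      · exact pvShapeEq_foldl _ _ (fun g (a : Int) => pvShapeEq_set2 g a.toNat cN k) g
      · exact pvShapeEq_refl g
    rw [ih _ (by rw [hshape.1]; exact hh) (fun rr hrr => by rw [hshape.2 rr]; exact hc rr hrr)]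
    rw [pvFoldl_or (fun v => pvCovB read nN v (r' : Int)) (fun v => v) K
      (if pvCovB read nN k (r' : Int) then some k else none)]
    by_cases h1 : c' = cN
    · subst h1
      rw [if_pos rfl, if_pos rfl]
      rcases hK : K.foldl (fun best v => if pvCovB read nN v (r' : Int) then some v else best) none with _ | xx
      · simp only [Option.none_or]
        rw [pvStepCol_gN c' read nN k g hh hc r' c']
        by_cases hcv : pvCovB read nN k (r' : Int)
        · rw [if_pos ⟨rfl, hcv⟩, if_pos hcv]
          rfl
        · rw [if_neg (fun hhh => hcv hhh.2), if_neg hcv]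
      · simp
    · rw [if_neg h1, if_neg h1]
      rw [pvStepCol_gN cN read nN k g hh hc r' c']
      rw [if_neg (fun hhh => h1 hhh.1)]

theorem pvFillCol_gN (cN : Nat) (read : Int → Int) (nN : Nat) (g : List (List Int))
    (hh : nN ≤ g.length) (hc : ∀ rN, rN < nN → cN < (g.getD rN []).length) (r' c' : Nat) :
    gN (pvFillCol cN (pvPosDictIdx read (nN : Int)).items g) r' c' =
      if c' = cN then (pvWin read nN (r' : Int)).getD (gN g r' cN) else gN g r' c' := by
  unfold pvFillCol pvWin
  rw [pvPosDict_items, List.foldl_map]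
  exact pvFillColK cN read nN (pvKeys read nN) g hh hc r' c'

theorem pvFillCol_shape (cN : Nat) (items : List (Int × List Int)) (g : List (List Int)) :
    pvShapeEq (pvFillCol cN items g) g := by
  unfold pvFillCol
  apply pvShapeEq_foldl
  intro g p
  split_ifs
  · exact pvShapeEq_foldl _ _ (fun g (a : Int) => pvShapeEq_set2 g a.toNat cN p.1) g
  · exact pvShapeEq_refl g

-- ---- the two passes of A, pointwise ----
-- a row of the grid is at least wN long
theorem pvRowLen (grid : List (List Int)) (wN : Nat) (hw : ∀ row ∈ grid, wN ≤ row.length)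
    (r : Nat) (hr : r < grid.length) : wN ≤ (grid.getD r []).length := by
  rw [List.getD_eq_getElem?_getD, List.getElem?_eq_getElem hr]
  exact hw _ (List.getElem_mem hr)

theorem pvHPass_aux (grid : List (List Int)) (wN : Nat)
    (hw : ∀ row ∈ grid, wN ≤ row.length) :
    ∀ n, n ≤ grid.length →
      (∀ r' c' : Nat,
        gN ((List.range n).foldl (fun res r =>
            pvFillRow r (pvPosDictIdx (fun c => pvCell grid (r : Int) c) (wN : Int)).items res) grid) r' c'
          = if r' < n then pvHVal grid wN r' c' else gN grid r' c') ∧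
      pvShapeEq ((List.range n).foldl (fun res r =>
          pvFillRow r (pvPosDictIdx (fun c => pvCell grid (r : Int) c) (wN : Int)).items res) grid) grid := by
  intro n
  induction n with
  | zero => exact fun _ => ⟨fun r' c' => by simp, pvShapeEq_refl grid⟩
  | succ n ih =>
    intro hn
    obtain ⟨ihg, ihs⟩ := ih (by omega)
    rw [List.range_succ, List.foldl_append, List.foldl_cons, List.foldl_nil]
    constructor
    · intro r' c'
      rw [pvFillRow_gN n (fun c => pvCell grid (n : Int) c) wN _
        (by rw [ihs.1]; omega) (by rw [ihs.2 n]; exact pvRowLen grid wN hw n (by omega)) r' c']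
      by_cases h1 : r' = n
      · subst h1
        rw [if_pos rfl, ihg r' c', if_neg (by omega), if_pos (by omega)]
        rfl
      · rw [if_neg h1, ihg r' c']
        by_cases h2 : r' < n
        · rw [if_pos h2, if_pos (by omega)]
        · rw [if_neg h2, if_neg (by omega)]
    · exact pvShapeEq_trans (pvFillRow_shape _ _ _) ihs

theorem pvHPass_gN (grid : List (List Int)) (wN : Nat)
    (hw : ∀ row ∈ grid, wN ≤ row.length) (r' c' : Nat) :
    gN ((PySem.List.pyRange 0 (grid.length : Int)).foldl (fun res r =>
          pvFillRow r.toNat (pvPosDictIdx (fun c => pvCell grid r c) (wN : Int)).items res) grid) r' c'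
      = if r' < grid.length then pvHVal grid wN r' c' else gN grid r' c' := by
  rw [PySem.List.pyRange_zero_natCast, List.foldl_map]
  simp only [Int.toNat_natCast]
  exact (pvHPass_aux grid wN hw grid.length le_rfl).1 r' c'

theorem pvHPass_shape (grid : List (List Int)) (wN : Nat) :
    pvShapeEq ((PySem.List.pyRange 0 (grid.length : Int)).foldl (fun res r =>
      pvFillRow r.toNat (pvPosDictIdx (fun c => pvCell grid r c) (wN : Int)).items res) grid) grid :=
  pvShapeEq_foldl _ _ (fun g (r : Int) => pvFillRow_shape r.toNat _ g) grid

theorem pvVPass_aux (grid g : List (List Int)) (wN : Nat)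
    (hsh : pvShapeEq g grid) (hw : ∀ row ∈ grid, wN ≤ row.length) :
    ∀ m, m ≤ wN →
      (∀ r' c' : Nat,
        gN ((List.range m).foldl (fun res c =>
            pvFillCol c (pvPosDictIdx (fun r => pvCell grid r (c : Int)) (grid.length : Int)).items res) g) r' c'
          = if c' < m then
              (pvWin (fun r => pvCell grid r (c' : Int)) grid.length (r' : Int)).getD (gN g r' c')
            else gN g r' c') ∧
      pvShapeEq ((List.range m).foldl (fun res c =>
          pvFillCol c (pvPosDictIdx (fun r => pvCell grid r (c : Int)) (grid.length : Int)).items res) g) g := by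
  intro m
  induction m with
  | zero => exact fun _ => ⟨fun r' c' => by simp, pvShapeEq_refl g⟩
  | succ m ih =>
    intro hm
    obtain ⟨ihg, ihs⟩ := ih (by omega)
    have ihs' := pvShapeEq_trans ihs hsh
    rw [List.range_succ, List.foldl_append, List.foldl_cons, List.foldl_nil]
    constructor
    · intro r' c'
      rw [pvFillCol_gN m (fun r => pvCell grid r (m : Int)) grid.length _
        (by rw [ihs'.1]) (fun rr hrr => by
          rw [ihs'.2 rr]
          have := pvRowLen grid wN hw rr hrr
          omega) r' c']
      by_cases h1 : c' = m
      · subst h1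
        rw [if_pos rfl, ihg r' c', if_neg (by omega), if_pos (by omega)]
      · rw [if_neg h1, ihg r' c']
        by_cases h2 : c' < m
        · rw [if_pos h2, if_pos (by omega)]
        · rw [if_neg h2, if_neg (by omega)]
    · exact pvShapeEq_trans (pvFillCol_shape _ _ _) ihs

theorem pvVPass_gN (grid g : List (List Int)) (wN : Nat)
    (hsh : pvShapeEq g grid)
    (hg : ∀ r' c' : Nat, gN g r' c' = if r' < grid.length then pvHVal grid wN r' c' else gN grid r' c')
    (hw : ∀ row ∈ grid, wN ≤ row.length) (r' c' : Nat) (hr' : r' < grid.length) :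
    gN ((PySem.List.pyRange 0 (wN : Int)).foldl (fun res c =>
          pvFillCol c.toNat (pvPosDictIdx (fun r => pvCell grid r c) (grid.length : Int)).items res) g) r' c'
      = pvFVal grid grid.length wN r' c' := by
  rw [PySem.List.pyRange_zero_natCast, List.foldl_map]
  simp only [Int.toNat_natCast]
  rw [(pvVPass_aux grid g wN hsh hw wN le_rfl).1 r' c']
  unfold pvFVal
  rw [hg r' c', if_pos hr']

theorem pvVPass_shape (grid g : List (List Int)) (wN : Nat) :
    pvShapeEq ((PySem.List.pyRange 0 (wN : Int)).foldl (fun res c =>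
      pvFillCol c.toNat (pvPosDictIdx (fun r => pvCell grid r c) (grid.length : Int)).items res) g) g :=
  pvShapeEq_foldl _ _ (fun g (c : Int) => pvFillCol_shape c.toNat _ g) g

-- ---- A's output, pointwise ----
theorem pvA_gN (grid : List (List Int)) (hne : ¬ (grid = [] ∨ grid.headD [] = []))
    (hpre : ∀ row ∈ grid, (grid.headD []).length ≤ row.length) :
    pvShapeEq (draw_line_between_objects grid) grid ∧
    ∀ r' c' : Nat, r' < grid.length →
      gN (draw_line_between_objects grid) r' c' =
        pvFVal grid grid.length (grid.headD []).length r' c' := by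
  have hw : ∀ row ∈ grid, (grid.headD []).length ≤ row.length := hpre
  constructor
  · simp only [draw_line_between_objects, if_neg hne]
    exact pvShapeEq_trans (pvVPass_shape grid _ _) (pvHPass_shape grid _)
  · intro r' c' hr'
    simp only [draw_line_between_objects, if_neg hne]
    exact pvVPass_gN grid _ (grid.headD []).length (pvHPass_shape grid _)
      (fun r c => pvHPass_gN grid _ hw r c) hw r' c' hr'

-- ---- B's side ----
theorem pvPlIdx_congr (read read' : Int → Int) (nN : Nat)
    (h : ∀ i : Int, 0 ≤ i → i < (nN : Int) → read i = read' i) :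
    pvPlIdx read nN = pvPlIdx read' nN := by
  unfold pvPlIdx
  congr 1
  apply List.map_congr_left
  intro i hi
  rw [PySem.List.mem_pyRange_one] at hi
  rw [h i hi.1 hi.2]

theorem pvWin_congr (read read' : Int → Int) (nN : Nat)
    (h : ∀ i : Int, 0 ≤ i → i < (nN : Int) → read i = read' i) (i : Int) :
    pvWin read nN i = pvWin read' nN i := by
  unfold pvWin pvCovB pvOcc pvKeys
  simp only [pvPlIdx_congr read read' nN h]

-- how one color's (first, last) entry evolves when a block of its occurrences is consumed
def pvComb (o : Option (Int × Int)) (ps : List Int) : Option (Int × Int) :=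
  match ps with
  | [] => o
  | i :: ps' => some ((o.map Prod.fst).getD i, ps'.getLastD i)

theorem pvSpansFold_get? (pl : List (Int × Int)) :
    ∀ (d : PySem.Dict Int (Int × Int)) (v : Int),
    (pl.foldl (fun d p =>
        d.insert p.1 (if d.contains p.1 then ((d.getD p.1 (0, 0)).1, p.2) else (p.2, p.2))) d).get? v
      = pvComb (d.get? v) ((pl.filter (fun p => p.1 == v)).map (fun p => p.2)) := by
  induction pl with
  | nil => intro d v; rfl
  | cons q pl ih =>
    intro d v
    rw [List.foldl_cons, ih]
    by_cases hv : q.1 = v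
    · rw [List.filter_cons_of_pos (by simp [hv]), List.map_cons]
      have hget : ((d.insert q.1 (if d.contains q.1 then ((d.getD q.1 (0, 0)).1, q.2)
          else (q.2, q.2))).get? v) =
          some (if d.contains q.1 then ((d.getD q.1 (0, 0)).1, q.2) else (q.2, q.2)) := by
        rw [← hv]
        exact PySem.Dict.get?_insert_self _ _ _
      rw [hget]
      rw [PySem.Dict.contains_eq_isSome_get?, PySem.Dict.getD_eq_get?_getD, hv]
      rcases hd : d.get? v with _ | fs
      · simp only [Option.isSome_none, Bool.false_eq_true, if_false]
        rcases hrest : (pl.filter (fun p => p.1 == v)).map (fun p => p.2) with _ | ⟨j, ps⟩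
        · rw [hrest]
          simp only [pvComb, List.getLastD_nil, Option.map_none, Option.getD_none]
        · rw [hrest]
          simp only [pvComb, List.getLastD_cons, Option.map_some, Option.getD_some,
            Option.map_none, Option.getD_none]
      · simp only [Option.isSome_some, if_true]
        rcases hrest : (pl.filter (fun p => p.1 == v)).map (fun p => p.2) with _ | ⟨j, ps⟩
        · rw [hrest]
          simp only [pvComb, List.getLastD_nil, Option.map_some, Option.getD_some]
        · rw [hrest]
          simp only [pvComb, List.getLastD_cons, Option.map_some, Option.getD_some]
    · rw [List.filter_cons_of_neg (by simp [hv])]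
      rw [PySem.Dict.get?_insert_of_ne d _ (fun (hh : v = q.1) => hv hh.symm)]

theorem pvSpans_eq_fold (line : List Int) :
    pvSpans line = (pvPlIdx (fun j => PySem.List.pyGetD line j 0) line.length).foldl
      (fun d p => d.insert p.1 (if d.contains p.1 then ((d.getD p.1 (0, 0)).1, p.2)
        else (p.2, p.2))) PySem.Dict.empty := by
  unfold pvSpans pvPlIdx
  rw [PySem.List.enumerate_eq_map_pyRange line 0, List.foldl_filter, List.foldl_map, List.foldl_map]
  have hlen : PySem.List.len line = (line.length : Int) := rfl
  rw [hlen]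
  simp only [bne_iff_ne, ne_eq]

theorem pvSpans_get? (line : List Int) (v : Int) :
    (pvSpans line).get? v =
      match pvOcc (fun j => PySem.List.pyGetD line j 0) line.length v with
      | [] => none
      | x :: t => some (x, t.getLastD x) := by
  rw [pvSpans_eq_fold, pvSpansFold_get? _ PySem.Dict.empty v, PySem.Dict.get?_empty]
  rcases hocc : pvOcc (fun j => PySem.List.pyGetD line j 0) line.length v with _ | ⟨x, t⟩
  · rw [show ((pvPlIdx (fun j => PySem.List.pyGetD line j 0) line.length).filter
      (fun p => p.1 == v)).map (fun p => p.2) = [] from hocc]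
    rfl
  · rw [show ((pvPlIdx (fun j => PySem.List.pyGetD line j 0) line.length).filter
      (fun p => p.1 == v)).map (fun p => p.2) = x :: t from hocc]
    rfl

theorem pvSpans_keys (line : List Int) :
    (pvSpans line).keys = pvKeys (fun j => PySem.List.pyGetD line j 0) line.length := by
  rw [pvSpans_eq_fold]
  rw [PySem.Dict.keys_foldl_insert_key
    (pvPlIdx (fun j => PySem.List.pyGetD line j 0) line.length) (fun p => p.1)
    (fun d p => if d.contains p.1 then ((d.getD p.1 (0, 0)).1, p.2) else (p.2, p.2))
    PySem.Dict.empty]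
  rw [PySem.Dict.keys_empty]
  rfl

theorem pvSpans_nodup (line : List Int) : (pvSpans line).keys.Nodup := by
  rw [pvSpans_eq_fold]
  exact PySem.Dict.nodup_keys_foldl_insert_key
    (pvPlIdx (fun j => PySem.List.pyGetD line j 0) line.length) (fun p => p.1)
    (fun d p => if d.contains p.1 then ((d.getD p.1 (0, 0)).1, p.2) else (p.2, p.2))
    PySem.Dict.empty (by rw [PySem.Dict.keys_empty]; exact List.nodup_nil)

theorem pvPick_eq_win (line : List Int) (i dflt : Int) :
    pvPick (pvSpans line) i dflt =
      (pvWin (fun j => PySem.List.pyGetD line j 0) line.length i).getD dflt := by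
  unfold pvPick pvWin
  rw [PySem.Dict.items_eq_map_keys _ (pvSpans_nodup line) ((0 : Int), (0 : Int)),
    pvSpans_keys, List.foldl_map]
  rw [PySem.List.foldl_congr_mem _ _
    (fun best v => if pvCovB (fun j => PySem.List.pyGetD line j 0) line.length v i
      then some v else best) none ?_]
  intro acc k hk
  rcases hocc : pvOcc (fun j => PySem.List.pyGetD line j 0) line.length k with _ | ⟨x, t⟩
  · exact absurd hocc (pvKeys_occ_ne _ _ k hk)
  · have hgd : (pvSpans line).getD k ((0 : Int), (0 : Int)) = (x, t.getLastD x) := by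
      rw [PySem.Dict.getD_eq_get?_getD, pvSpans_get? line k, hocc]
      rfl
    rw [hgd]
    dsimp only
    unfold pvCovB
    rw [hocc]
    simp only [decide_eq_true_eq]

-- no color's span covers an index at or beyond the scan bound
theorem pvWin_none_of_ge (read : Int → Int) (nN : Nat) (i : Int) (hi : (nN : Int) ≤ i) :
    pvWin read nN i = none := by
  unfold pvWin
  have hcov : ∀ v, pvCovB read nN v i = false := by
    intro v
    unfold pvCovB
    rcases hocc : pvOcc read nN v with _ | ⟨x, t⟩
    · rfl
    · have hlast := (pvOcc_mem read nN v (t.getLastD x) (by rw [hocc]; exact List.getLastD_mem_cons)).2.1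
      simp only [decide_eq_false_iff_not]
      omega
  generalize (none : Option Int) = b
  induction (pvKeys read nN) generalizing b with
  | nil => rfl
  | cons k K ih =>
    rw [List.foldl_cons, hcov k]
    simp only [Bool.false_eq_true, if_false]
    exact ih b

-- getD helpers
theorem pvGetD_map_range {α : Type} (f : Nat → α) (n r : Nat) (d : α) (h : r < n) :
    ((List.range n).map f).getD r d = f r := by
  rw [List.getD_eq_getElem?_getD, List.getElem?_map, List.getElem?_range h]
  rfl

theorem pvGetD_map {α β : Type} (l : List α) (f : α → β) (r : Nat) (d : α) (dflt : β)
    (h : r < l.length) : (l.map f).getD r dflt = f (l.getD r d) := by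
  rw [List.getD_eq_getElem?_getD, List.getElem?_map, List.getElem?_eq_getElem h,
    List.getD_eq_getElem?_getD, List.getElem?_eq_getElem h]
  rfl

-- row r of a rectangular grid has width wN
theorem pvRowLenEq (grid : List (List Int))
    (hrect : ∀ row ∈ grid, row.length = (grid.headD []).length)
    (r : Nat) (hr : r < grid.length) :
    (grid.getD r []).length = (grid.headD []).length := by
  rw [List.getD_eq_getElem?_getD, List.getElem?_eq_getElem hr]
  exact hrect _ (List.getElem_mem hr)

-- B's output, pointwise
theorem pvB_gN (grid : List (List Int)) (hne : ¬ (grid = [] ∨ grid.headD [] = []))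
    (hrect : ∀ row ∈ grid, row.length = (grid.headD []).length) :
    pvShapeEq (draw_line_between_objects_alt grid) grid ∧
    ∀ r' c' : Nat, r' < grid.length →
      gN (draw_line_between_objects_alt grid) r' c' =
        pvFVal grid grid.length (grid.headD []).length r' c' := by
  have hB : draw_line_between_objects_alt grid =
      (List.range grid.length).map (fun rN =>
        (List.range (grid.headD []).length).map (fun cN =>
          pvPick (PySem.List.pyGetD ((PySem.List.pyRange 0 (((grid.headD []).length : Nat) : Int)).map (fun c => pvSpans (grid.map (fun row => PySem.List.pyGetD row c 0)))) ((cN : Nat) : Int) PySem.Dict.empty) ((rN : Nat) : Int)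
            (pvPick (PySem.List.pyGetD (grid.map (fun row => pvSpans row)) ((rN : Nat) : Int) PySem.Dict.empty) ((cN : Nat) : Int)
              (PySem.List.pyGetD (PySem.List.pyGetD grid ((rN : Nat) : Int) []) ((cN : Nat) : Int) 0)))) := by
    simp only [draw_line_between_objects_alt, if_neg hne,
      PySem.List.pyRange_zero_natCast, List.map_map]
    rfl
  have hwr := fun r hr => pvRowLenEq grid hrect r hr
  constructor
  · rw [hB]
    refine ⟨by rw [List.length_map, List.length_range], fun r => ?_⟩
    by_cases hr : r < grid.length
    · rw [pvGetD_map_range _ _ _ _ hr, List.length_map, List.length_range, hwr r hr]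
    · rw [List.getD_eq_getElem?_getD, List.getElem?_eq_none (by
        rw [List.length_map, List.length_range]; omega)]
      rw [List.getD_eq_getElem?_getD, List.getElem?_eq_none (by omega)]
  · intro r' c' hr'
    unfold gN
    rw [hB, pvGetD_map_range _ _ _ _ hr']
    by_cases hc : c' < (grid.headD []).length
    · rw [pvGetD_map_range _ _ _ _ hc]
      rw [PySem.List.pyGetD_map_pyRange _ _ _ _ hc]
      rw [pvPick_eq_win]
      rw [PySem.List.pyGetD_natCast, pvGetD_map grid _ r' [] _ hr']
      rw [pvPick_eq_win]
      rw [List.length_map]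
      rw [hwr r' hr']
      rw [pvWin_congr (fun j => PySem.List.pyGetD (grid.map (fun row => PySem.List.pyGetD row (c' : Int) 0)) j 0)
        (fun j => pvCell grid j (c' : Int)) grid.length (fun j hj0 hj => by
          dsimp only
          have hjn : j = (j.toNat : Int) := by omega
          rw [hjn, PySem.List.pyGetD_natCast,
            pvGetD_map grid _ j.toNat [] 0 (by omega)]
          unfold pvCell
          rw [PySem.List.pyGetD_natCast grid j.toNat []]) (r' : Int)]
      rw [pvWin_congr (fun j => PySem.List.pyGetD (grid.getD r' []) j 0)
        (fun j => pvCell grid (r' : Int) j) (grid.headD []).length (fun j hj0 hj => by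
          dsimp only
          unfold pvCell
          rw [PySem.List.pyGetD_natCast grid r' []]) (c' : Int)]
      unfold pvFVal pvHVal gN
      rw [if_pos hc, PySem.List.pyGetD_natCast grid r' [], PySem.List.pyGetD_natCast]
    · rw [List.getD_eq_getElem?_getD, List.getElem?_eq_none (by
        rw [List.length_map, List.length_range]; omega), Option.getD_none]
      unfold pvFVal pvHVal gN
      rw [if_neg hc, pvWin_none_of_ge _ _ _ (by omega), Option.getD_none]
      rw [List.getD_eq_getElem?_getD, List.getElem?_eq_none (by rw [hwr r' hr']; omega),
        Option.getD_none]

-- two grids of the same shape that agree cellwise are equal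
theorem pvOut_eq (g1 g2 grid : List (List Int)) (h1 : pvShapeEq g1 grid) (h2 : pvShapeEq g2 grid)
    (h : ∀ r, r < grid.length → ∀ c, gN g1 r c = gN g2 r c) : g1 = g2 := by
  apply List.ext_getElem (h1.1.trans h2.1.symm)
  intro r hr1 hr2
  have hrg : r < grid.length := by rw [← h1.1]; exact hr1
  have e1 := List.getD_eq_getElem g1 [] hr1
  have e2 := List.getD_eq_getElem g2 [] hr2
  have hrow : g1.getD r [] = g2.getD r [] := by
    apply List.ext_getElem ((h1.2 r).trans (h2.2 r).symm)
    intro c hc1 hc2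
    have f1 := List.getD_eq_getElem (g1.getD r []) 0 hc1
    have f2 := List.getD_eq_getElem (g2.getD r []) 0 hc2
    rw [← f1, ← f2]
    exact h r hrg c
  exact e1.symm.trans (hrow.trans e2)

-- ===== VERDICT (by name: the statement is the Claim_ definition above) =====
theorem draw_line_between_objects_spec : Claim_equal_draw_line_between_objects := by
  intro grid hdom hpre
  unfold Spec_draw_line_between_objects
  by_cases hne : grid = [] ∨ grid.headD [] = []
  · unfold draw_line_between_objects draw_line_between_objects_alt
    rw [if_pos hne, if_pos hne]
  · have hrect : ∀ row ∈ grid, row.length = (grid.headD []).length := by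
      rcases hpre with h | h
      · exact absurd (Or.inr h) hne
      · exact h
    obtain ⟨hsa, hca⟩ := pvA_gN grid hne (fun row hrow => (hrect row hrow).ge)
    obtain ⟨hsb, hcb⟩ := pvB_gN grid hne hrect
    exact pvOut_eq _ _ grid hsa hsb (fun r hr c => by rw [hca r c hr, hcb r c hr])
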